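-- pv_equiv track=rewrite | github.com/limedisxx/homeworksss_ | древний_шифр_дз.py | find_password
-- ===== SOURCE A (Python) =====
-- def find_password(n):
--     pairs = []
--
--     for i in range(1, n + 1):
--         for j in range(i + 1, n + 1):
--             if n % (i + j) == 0:
--                 pairs.append(str(i))
--                 pairs.append(str(j))
--
--     return ''.join(pairs)
-- ===== SOURCE B (Python) =====
-- def find_password(n):
--     # Precompute the divisors of n once; for each i, every valid partner j
--     # corresponds to a divisor d = i + j with d > 2*i (then j = d - i).
--     divisors = [d for d in range(1, n + 1) if n % d == 0]
--     out = []
--     for i in range(1, n + 1):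
--         for d in divisors:
--             if d > 2 * i:
--                 out.append(str(i))
--                 out.append(str(d - i))
--     return ''.join(out)
-- ===== Notes on version B (the rewrite author's own statement) =====
-- stated objective: faster
-- what changed: B precomputes the list of divisors of n once, so A's inner scan over all candidate partners j is replaced by a scan over the d(n) divisors (each divisor d exceeding twice i yields the pair (i, d-i)); A's quadratic double loop disappears.
import Mathlib
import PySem

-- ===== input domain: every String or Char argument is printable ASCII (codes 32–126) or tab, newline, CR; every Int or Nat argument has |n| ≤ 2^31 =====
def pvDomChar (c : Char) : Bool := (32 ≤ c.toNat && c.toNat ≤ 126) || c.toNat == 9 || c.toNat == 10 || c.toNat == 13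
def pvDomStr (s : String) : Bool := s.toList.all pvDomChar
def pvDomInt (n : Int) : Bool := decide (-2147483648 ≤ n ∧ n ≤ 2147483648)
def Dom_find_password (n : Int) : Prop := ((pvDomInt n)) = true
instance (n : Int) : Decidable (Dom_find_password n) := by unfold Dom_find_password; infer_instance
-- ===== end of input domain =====

-- B precomputes the divisors of n once and pairs each i with the divisors exceeding twice i,
-- removing A's quadratic inner scan over all j.

-- ===== PORT A =====
def find_password (n : Int) : String :=
  let pairs : List String :=
    (PySem.List.pyRange 1 (n + 1) 1).foldl (fun pairs i =>
      (PySem.List.pyRange (i + 1) (n + 1) 1).foldl (fun pairs j =>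
        if PySem.Int.mod n (i + j) == 0 then
          pairs ++ [PySem.Int.toStr i, PySem.Int.toStr j]
        else pairs) pairs) []
  PySem.Str.join "" pairs

-- ===== PORT B =====
def find_password_alt (n : Int) : String :=
  let divisors : List Int :=
    (PySem.List.pyRange 1 (n + 1) 1).filter (fun d => PySem.Int.mod n d == 0)
  let out : List String :=
    (PySem.List.pyRange 1 (n + 1) 1).foldl (fun out i =>
      divisors.foldl (fun out d =>
        if d > 2 * i then out ++ [PySem.Int.toStr i, PySem.Int.toStr (d - i)]
        else out) out) []
  PySem.Str.join "" out

-- ===== PRECONDITION & SPEC =====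
def Spec_find_password (n : Int) (out : String) : Prop := out = find_password_alt n
instance (n : Int) (out : String) : Decidable (Spec_find_password n out) := by unfold Spec_find_password; infer_instance

-- ===== CLAIM (what is proved, stated in full; the proofs are below) =====
def Claim_equal_find_password : Prop := ∀ (n : Int), Dom_find_password n → Spec_find_password n (find_password n)

-- ===== LEMMAS AND PROOFS =====

-- 'if p then acc ++ f x else acc' folded over a list appends the flatMap of the guarded blocks
theorem pv_foldl_if_append {α β : Type} (l : List α) (p : α → Prop) [DecidablePred p]
    (f : α → List β) (acc : List β) :
    l.foldl (fun acc x => if p x then acc ++ f x else acc) acc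
      = acc ++ l.flatMap (fun x => if p x then f x else []) := by
  induction l generalizing acc with
  | nil => simp
  | cons a l ih =>
    simp only [List.foldl_cons, List.flatMap_cons, ih]
    split <;> simp

theorem pv_filter_flatMap {α β : Type} (l : List α) (p : α → Bool) (g : α → List β) :
    (l.filter p).flatMap g = l.flatMap (fun x => if p x then g x else []) := by
  induction l with
  | nil => rfl
  | cons a l ih =>
    by_cases h : p a <;> simp [h, ih]

theorem pv_flatMap_pyRange_shift {β : Type} (a b c : Int) (g : Int → List β) :
    (PySem.List.pyRange (a + c) (b + c) 1).flatMap g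
      = (PySem.List.pyRange a b 1).flatMap (fun x => g (x + c)) := by
  rw [PySem.List.pyRange_one, PySem.List.pyRange_one]
  have h : b + c - (a + c) = b - a := by ring
  rw [h, List.flatMap_map, List.flatMap_map]
  apply List.flatMap_congr
  intro k _
  congr 1
  ring

-- a divisor test fails above n (for n ≥ 1)
theorem pv_mod_ne_zero_of_gt (n d : Int) (hn : 1 ≤ n) (hd : n < d) :
    ¬ (PySem.Int.mod n d == 0) = true := by
  simp only [beq_iff_eq, PySem.Int.mod_eq_zero_iff_dvd]
  intro hdvd
  have := Int.le_of_dvd (by omega) hdvd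
  omega

-- core: for 1 ≤ i ≤ n, A's inner scan over j equals B's scan over the divisors of n
theorem pv_inner (n i : Int) (h1 : 1 ≤ i) (h2 : i ≤ n) :
    (PySem.List.pyRange (i + 1) (n + 1) 1).flatMap
        (fun j => if PySem.Int.mod n (i + j) == 0
                  then [PySem.Int.toStr i, PySem.Int.toStr j] else [])
      = ((PySem.List.pyRange 1 (n + 1) 1).filter (fun d => PySem.Int.mod n d == 0)).flatMap
          (fun d => if d > 2 * i
                    then [PySem.Int.toStr i, PySem.Int.toStr (d - i)] else []) := by
  rw [pv_filter_flatMap]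
  by_cases hc : 2 * i ≤ n
  · -- split both ranges at the first useful point
    rw [PySem.List.pyRange_one_append 1 (2 * i + 1) (n + 1) (by omega) (by omega),
        PySem.List.pyRange_one_append (i + 1) (n - i + 1) (n + 1) (by omega) (by omega),
        List.flatMap_append, List.flatMap_append]
    have hR1 : (PySem.List.pyRange 1 (2 * i + 1) 1).flatMap
        (fun d => if (PySem.Int.mod n d == 0) = true
                  then if d > 2 * i then [PySem.Int.toStr i, PySem.Int.toStr (d - i)] else []
                  else []) = [] := by
      rw [List.flatMap_eq_nil_iff]
      intro d hd
      rw [PySem.List.mem_pyRange_one] at hd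
      split_ifs with _ h2i
      · omega
      · rfl
      · rfl
    have hL2 : (PySem.List.pyRange (n - i + 1) (n + 1) 1).flatMap
        (fun j => if PySem.Int.mod n (i + j) == 0
                  then [PySem.Int.toStr i, PySem.Int.toStr j] else []) = [] := by
      rw [List.flatMap_eq_nil_iff]
      intro j hj
      rw [PySem.List.mem_pyRange_one] at hj
      rw [if_neg (pv_mod_ne_zero_of_gt n (i + j) (by omega) (by omega))]
    rw [hR1, hL2, List.append_nil, List.nil_append]
    have hshift := pv_flatMap_pyRange_shift (i + 1) (n - i + 1) i
        (fun d => if PySem.Int.mod n d == 0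
                  then [PySem.Int.toStr i, PySem.Int.toStr (d - i)] else [])
    have he1 : i + 1 + i = 2 * i + 1 := by ring
    have he2 : n - i + 1 + i = n + 1 := by ring
    rw [he1, he2] at hshift
    rw [show (PySem.List.pyRange (i + 1) (n - i + 1) 1).flatMap
        (fun j => if PySem.Int.mod n (i + j) == 0
                  then [PySem.Int.toStr i, PySem.Int.toStr j] else [])
        = (PySem.List.pyRange (i + 1) (n - i + 1) 1).flatMap
        (fun x => if PySem.Int.mod n (x + i) == 0
                  then [PySem.Int.toStr i, PySem.Int.toStr (x + i - i)] else []) from by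
      apply List.flatMap_congr; intro j _
      have : i + j = j + i := by ring
      rw [this, show j + i - i = j by ring]]
    rw [← hshift]
    apply List.flatMap_congr
    intro d hd
    rw [PySem.List.mem_pyRange_one] at hd
    rw [if_pos (by omega : d > 2 * i)]
  · -- n < 2*i: both sides are empty
    have hL : (PySem.List.pyRange (i + 1) (n + 1) 1).flatMap
        (fun j => if PySem.Int.mod n (i + j) == 0
                  then [PySem.Int.toStr i, PySem.Int.toStr j] else []) = [] := by
      rw [List.flatMap_eq_nil_iff]
      intro j hj
      rw [PySem.List.mem_pyRange_one] at hj
      rw [if_neg (pv_mod_ne_zero_of_gt n (i + j) (by omega) (by omega))]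
    have hR : (PySem.List.pyRange 1 (n + 1) 1).flatMap
        (fun d => if (PySem.Int.mod n d == 0) = true
                  then if d > 2 * i then [PySem.Int.toStr i, PySem.Int.toStr (d - i)] else []
                  else []) = [] := by
      rw [List.flatMap_eq_nil_iff]
      intro d hd
      rw [PySem.List.mem_pyRange_one] at hd
      split_ifs with _ h2i
      · omega
      · rfl
      · rfl
    rw [hL, hR]

-- ===== VERDICT (by name: the statement is the Claim_ definition above) =====
theorem find_password_spec : Claim_equal_find_password := by
  intro n _
  unfold Spec_find_password find_password find_password_alt
  dsimp only
  congr 1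
  apply PySem.List.foldl_congr_mem
  intro acc i hi
  rw [PySem.List.mem_pyRange_one] at hi
  rw [pv_foldl_if_append _ (fun j => (PySem.Int.mod n (i + j) == 0) = true),
      pv_foldl_if_append _ (fun d => d > 2 * i)]
  congr 1
  exact pv_inner n i (by omega) (by omega)
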